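-- pv_equiv track=rewrite | github.com/firefly-hefeng/pancancer-analysis | analysis/meta_all_collect.py | _generalize_disease
-- ===== SOURCE A (Python) =====
-- def _generalize_disease(disease: str) -> str:
--     """疾病分类"""
--     disease_lower = disease.lower()
--
--     if any(kw in disease_lower for kw in ['cancer', 'tumor', 'carcinoma', 'adenocarcinoma']):
--         return 'Cancer'
--     elif any(kw in disease_lower for kw in ['normal', 'healthy', 'control']):
--         return 'Normal'
--     elif 'covid' in disease_lower:
--         return 'Infectious Disease'
--     elif any(kw in disease_lower for kw in ['diabetes', 'metabolic']):
--         return 'Metabolic Disease'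
--     elif any(kw in disease_lower for kw in ['alzheimer', 'parkinson', 'neurological']):
--         return 'Neurological Disease'
--     elif any(kw in disease_lower for kw in ['arthritis', 'autoimmune']):
--         return 'Autoimmune Disease'
--     else:
--         return 'Other'
-- ===== SOURCE B (Python) =====
-- # Single left-to-right scan over the lowered string: at each position, look up
-- # which keywords start there (keyword -> group-priority table) and keep the
-- # minimum priority seen; the answer is the category of that priority.
-- KEYWORD_PRIORITY = {
--     'cancer': 0, 'tumor': 0, 'carcinoma': 0, 'adenocarcinoma': 0,
--     'normal': 1, 'healthy': 1, 'control': 1,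
--     'covid': 2,
--     'diabetes': 3, 'metabolic': 3,
--     'alzheimer': 4, 'parkinson': 4, 'neurological': 4,
--     'arthritis': 5, 'autoimmune': 5,
-- }
-- CATEGORIES = ['Cancer', 'Normal', 'Infectious Disease', 'Metabolic Disease',
--               'Neurological Disease', 'Autoimmune Disease']
--
-- def _generalize_disease(disease: str) -> str:
--     dl = disease.lower()
--     best = None
--     for i in range(len(dl)):
--         for kw, pri in KEYWORD_PRIORITY.items():
--             if dl.startswith(kw, i):
--                 if best is None or pri < best:
--                     best = pri
--     return CATEGORIES[best] if best is not None else 'Other'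
-- ===== Notes on version B (the rewrite author's own statement) =====
-- stated objective: alternative
-- what changed: Instead of A's cascade of per-group substring searches, B makes a single left-to-right scan over the lowered input, matching a keyword->priority table at each position with startswith and keeping the minimum matched priority, then maps that priority to its category.
import Mathlib
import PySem

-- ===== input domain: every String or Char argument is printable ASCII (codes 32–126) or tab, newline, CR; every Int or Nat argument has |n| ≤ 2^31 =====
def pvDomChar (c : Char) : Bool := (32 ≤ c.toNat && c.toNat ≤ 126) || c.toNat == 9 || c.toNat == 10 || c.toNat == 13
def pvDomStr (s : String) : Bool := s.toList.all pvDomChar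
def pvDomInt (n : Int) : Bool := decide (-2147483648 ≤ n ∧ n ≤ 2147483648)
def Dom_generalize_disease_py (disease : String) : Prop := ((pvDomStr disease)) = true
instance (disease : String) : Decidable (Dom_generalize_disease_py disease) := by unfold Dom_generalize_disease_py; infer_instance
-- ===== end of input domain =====

-- B replaces A's cascade of per-group substring searches by a single positional scan with a
-- keyword->priority table, keeping the minimum matched priority (alternative decomposition).


-- ===== PORT A =====
def generalize_disease_py (disease : String) : String :=
  let disease_lower := PySem.Str.lower disease
  if ["cancer", "tumor", "carcinoma", "adenocarcinoma"].any (fun kw => PySem.Str.isIn kw disease_lower) then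
    "Cancer"
  else if ["normal", "healthy", "control"].any (fun kw => PySem.Str.isIn kw disease_lower) then
    "Normal"
  else if PySem.Str.isIn "covid" disease_lower then
    "Infectious Disease"
  else if ["diabetes", "metabolic"].any (fun kw => PySem.Str.isIn kw disease_lower) then
    "Metabolic Disease"
  else if ["alzheimer", "parkinson", "neurological"].any (fun kw => PySem.Str.isIn kw disease_lower) then
    "Neurological Disease"
  else if ["arthritis", "autoimmune"].any (fun kw => PySem.Str.isIn kw disease_lower) then
    "Autoimmune Disease"
  else
    "Other"

-- ===== PORT B =====
-- KEYWORD_PRIORITY, a dict with distinct literal keys, iterated in insertion order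
def pvKW : List (String × Nat) :=
  [("cancer", 0), ("tumor", 0), ("carcinoma", 0), ("adenocarcinoma", 0),
   ("normal", 1), ("healthy", 1), ("control", 1),
   ("covid", 2),
   ("diabetes", 3), ("metabolic", 3),
   ("alzheimer", 4), ("parkinson", 4), ("neurological", 4),
   ("arthritis", 5), ("autoimmune", 5)]

def pvCATS : List String :=
  ["Cancer", "Normal", "Infectious Disease", "Metabolic Disease",
   "Neurological Disease", "Autoimmune Disease"]

-- 'if best is None or pri < best: best = pri'
def pvUpd : Option Nat → Nat → Option Nat
  | none, p => some p
  | some b, p => if p < b then some p else some b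

def generalize_disease_py_alt (disease : String) : String :=
  let dl := (PySem.Str.lower disease).toList
  -- 'for i in range(len(dl)): for kw, pri in KEYWORD_PRIORITY.items(): if dl.startswith(kw, i): …'
  -- dl.startswith(kw, i) with 0 ≤ i is exactly the prefix test on dl[i:] (exact)
  let best := (List.range dl.length).foldl (fun best i =>
      pvKW.foldl (fun best kwp =>
        if PySem.Chars.startswith (dl.drop i) kwp.1.toList then pvUpd best kwp.2
        else best) best) (none : Option Nat)
  -- 'CATEGORIES[best] if best is not None else "Other"'; best < 6 always, so indexing never raises
  match best with
  | some b => pvCATS.getD b "Other"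
  | none => "Other"

-- ===== PRECONDITION & SPEC =====
def Spec_generalize_disease_py (disease : String) (out : String) : Prop := out = generalize_disease_py_alt disease
instance (disease : String) (out : String) : Decidable (Spec_generalize_disease_py disease out) := by unfold Spec_generalize_disease_py; infer_instance

-- ===== CLAIM (what is proved, stated in full; the proofs are below) =====
def Claim_equal_generalize_disease_py : Prop := ∀ (disease : String), Dom_generalize_disease_py disease → Spec_generalize_disease_py disease (generalize_disease_py disease)

-- ===== LEMMAS AND PROOFS =====

theorem pvUpd_some (b p : Nat) : pvUpd (some b) p = some (min b p) := by
  simp only [pvUpd, Nat.min_def]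
  rcases Nat.lt_or_ge p b with h | h
  · simp [h, Nat.not_le.mpr h]
  · simp [Nat.not_lt.mpr h, h]

theorem pvFoldl_upd_some (l : List Nat) (b : Nat) :
    l.foldl pvUpd (some b) = some (l.foldl min b) := by
  induction l generalizing b with
  | nil => rfl
  | cons x xs ih => rw [List.foldl_cons, pvUpd_some, List.foldl_cons]; exact ih (min b x)

theorem pvFoldl_upd_none (l : List Nat) : l.foldl pvUpd none = l.min? := by
  cases l with
  | nil => rfl
  | cons x xs =>
    rw [List.foldl_cons]
    show List.foldl pvUpd (some x) xs = (x :: xs).min?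
    rw [pvFoldl_upd_some]; rfl

theorem pvMin?_le (l : List Nat) (m : Nat) (h : l.min? = some m) : ∀ x ∈ l, m ≤ x := by
  cases l with
  | nil => simp at h
  | cons a as =>
    have hm : m = as.foldl min a := by
      have : (a :: as).min? = some (as.foldl min a) := rfl
      rw [this] at h; exact (Option.some_injective _ h).symm
    subst hm
    intro x hx
    rcases List.mem_cons.mp hx with rfl | hx
    · exact (PySem.List.foldl_min_le as x).1
    · exact (PySem.List.foldl_min_le as a).2 x hx

-- the multiset of priorities matched at some position of dl
def pvP (dl : List Char) : List Nat :=
  (List.range dl.length).flatMap (fun i =>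
    (pvKW.filter (fun kwp => PySem.Chars.startswith (dl.drop i) kwp.1.toList)).map Prod.snd)

theorem pvBest_eq_min? (dl : List Char) :
    ((List.range dl.length).foldl (fun best i =>
      pvKW.foldl (fun best kwp =>
        if PySem.Chars.startswith (dl.drop i) kwp.1.toList then pvUpd best kwp.2
        else best) best) (none : Option Nat)) = (pvP dl).min? := by
  rw [← pvFoldl_upd_none, pvP, List.foldl_flatMap]
  have inner : ∀ (i : Nat) (b : Option Nat),
      pvKW.foldl (fun best kwp =>
        if PySem.Chars.startswith (dl.drop i) kwp.1.toList then pvUpd best kwp.2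
        else best) b =
      ((pvKW.filter (fun kwp => PySem.Chars.startswith (dl.drop i) kwp.1.toList)).map
        Prod.snd).foldl pvUpd b := by
    intro i b
    rw [List.foldl_map, ← PySem.List.foldl_if_eq_foldl_filter]
  apply PySem.List.foldl_congr_mem
  intro acc i _
  exact inner i acc

-- a matched priority at some position is exactly a keyword occurring somewhere in dl
theorem pvMem_P_iff (dl : List Char) (g : Nat) :
    g ∈ pvP dl ↔ ∃ kwp ∈ pvKW, kwp.2 = g ∧ PySem.Chars.isIn kwp.1.toList dl = true := by
  constructor
  · rintro h
    simp only [pvP, List.mem_flatMap, List.mem_range, List.mem_map, List.mem_filter] at h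
    obtain ⟨i, _, kwp, ⟨hmem, hsw⟩, hsnd⟩ := h
    exact ⟨kwp, hmem, hsnd, (PySem.Chars.exists_prefix_drop_iff_isIn _ _).mp
      ⟨i, (PySem.Chars.startswith_iff _ _).mp hsw⟩⟩
  · rintro ⟨kwp, hmem, hsnd, hin⟩
    obtain ⟨j, hpre⟩ := (PySem.Chars.exists_prefix_drop_iff_isIn _ _).mpr hin
    have hne : kwp.1.toList ≠ [] := by fin_cases hmem <;> decide
    have hj : j < dl.length := by
      by_contra hge
      have hnil : dl.drop j = [] := List.drop_eq_nil_of_le (Nat.le_of_not_lt hge)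
      rw [hnil] at hpre
      exact hne (List.prefix_nil.mp hpre)
    simp only [pvP, List.mem_flatMap, List.mem_range, List.mem_map, List.mem_filter]
    exact ⟨j, hj, kwp, ⟨hmem, (PySem.Chars.startswith_iff _ _).mpr hpre⟩, hsnd⟩

theorem pvMem_P_lt (dl : List Char) (g : Nat) (h : g ∈ pvP dl) : g < 6 := by
  obtain ⟨kwp, hmem, hsnd, _⟩ := (pvMem_P_iff dl g).mp h
  subst hsnd
  fin_cases hmem <;> decide

-- group-level characterisations: g ∈ pvP dl ↔ some keyword of A's group g occurs in dl
theorem pvMem0 (dl : List Char) : 0 ∈ pvP dl ↔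
    (PySem.Chars.isIn "cancer".toList dl || (PySem.Chars.isIn "tumor".toList dl ||
     (PySem.Chars.isIn "carcinoma".toList dl || PySem.Chars.isIn "adenocarcinoma".toList dl))) = true := by
  rw [pvMem_P_iff]; simp [pvKW]

theorem pvMem1 (dl : List Char) : 1 ∈ pvP dl ↔
    (PySem.Chars.isIn "normal".toList dl || (PySem.Chars.isIn "healthy".toList dl ||
     PySem.Chars.isIn "control".toList dl)) = true := by
  rw [pvMem_P_iff]; simp [pvKW]

theorem pvMem2 (dl : List Char) : 2 ∈ pvP dl ↔ PySem.Chars.isIn "covid".toList dl = true := by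
  rw [pvMem_P_iff]; simp [pvKW]

theorem pvMem3 (dl : List Char) : 3 ∈ pvP dl ↔
    (PySem.Chars.isIn "diabetes".toList dl || PySem.Chars.isIn "metabolic".toList dl) = true := by
  rw [pvMem_P_iff]; simp [pvKW]

theorem pvMem4 (dl : List Char) : 4 ∈ pvP dl ↔
    (PySem.Chars.isIn "alzheimer".toList dl || (PySem.Chars.isIn "parkinson".toList dl ||
     PySem.Chars.isIn "neurological".toList dl)) = true := by
  rw [pvMem_P_iff]; simp [pvKW]

theorem pvMem5 (dl : List Char) : 5 ∈ pvP dl ↔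
    (PySem.Chars.isIn "arthritis".toList dl || PySem.Chars.isIn "autoimmune".toList dl) = true := by
  rw [pvMem_P_iff]; simp [pvKW]

-- the scan's minimum is g when g is matched and no smaller priority is
theorem pvMin?_eq (dl : List Char) (g : Nat) (hg : g ∈ pvP dl)
    (hmin : ∀ k, k < g → k ∉ pvP dl) : (pvP dl).min? = some g := by
  cases hmem : (pvP dl).min? with
  | none =>
    rw [List.min?_eq_none_iff] at hmem
    rw [hmem] at hg
    exact absurd hg (List.not_mem_nil)
  | some m =>
    have h1 := List.min?_mem hmem
    have h2 := pvMin?_le _ _ hmem g hg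
    have h3 : ¬ m < g := fun hlt => hmin m hlt h1
    have : m = g := by omega
    rw [this]

-- ===== VERDICT (by name: the statement is the Claim_ definition above) =====
theorem generalize_disease_py_spec : Claim_equal_generalize_disease_py := by
  intro disease _
  unfold Spec_generalize_disease_py
  unfold generalize_disease_py generalize_disease_py_alt
  simp only [List.any_cons, List.any_nil, Bool.or_false, PySem.Str.isIn_eq]
  rw [pvBest_eq_min?]
  set dl := (PySem.Str.lower disease).toList with hdl
  by_cases h0 : (0 : Nat) ∈ pvP dl
  · rw [pvMin?_eq dl 0 h0 (fun k hk _ => by omega)]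
    have e0 := (pvMem0 dl).mp h0
    rw [e0]
    rfl
  · have c0 := Bool.eq_false_iff.mpr (fun h => h0 ((pvMem0 dl).mpr h))
    by_cases h1 : (1 : Nat) ∈ pvP dl
    · rw [pvMin?_eq dl 1 h1 (fun k hk => by rw [Nat.lt_one_iff.mp hk]; exact h0)]
      have e1 := (pvMem1 dl).mp h1
      simp only [Bool.or_eq_false_iff] at c0
      rw [c0.1, c0.2.1, c0.2.2.1, c0.2.2.2, e1]
      rfl
    · have c1 := Bool.eq_false_iff.mpr (fun h => h1 ((pvMem1 dl).mpr h))
      by_cases h2 : (2 : Nat) ∈ pvP dl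
      · rw [pvMin?_eq dl 2 h2 (fun k hk => by
          interval_cases k
          · exact h0
          · exact h1)]
        have e2 := (pvMem2 dl).mp h2
        simp only [Bool.or_eq_false_iff] at c0 c1
        rw [c0.1, c0.2.1, c0.2.2.1, c0.2.2.2, c1.1, c1.2.1, c1.2.2, e2]
        rfl
      · have c2 := Bool.eq_false_iff.mpr (fun h => h2 ((pvMem2 dl).mpr h))
        by_cases h3 : (3 : Nat) ∈ pvP dl
        · rw [pvMin?_eq dl 3 h3 (fun k hk => by
            interval_cases k
            · exact h0
            · exact h1
            · exact h2)]
          have e3 := (pvMem3 dl).mp h3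
          simp only [Bool.or_eq_false_iff] at c0 c1
          rw [c0.1, c0.2.1, c0.2.2.1, c0.2.2.2, c1.1, c1.2.1, c1.2.2, c2, e3]
          rfl
        · have c3 := Bool.eq_false_iff.mpr (fun h => h3 ((pvMem3 dl).mpr h))
          by_cases h4 : (4 : Nat) ∈ pvP dl
          · rw [pvMin?_eq dl 4 h4 (fun k hk => by
              interval_cases k
              · exact h0
              · exact h1
              · exact h2
              · exact h3)]
            have e4 := (pvMem4 dl).mp h4
            simp only [Bool.or_eq_false_iff] at c0 c1 c3
            rw [c0.1, c0.2.1, c0.2.2.1, c0.2.2.2, c1.1, c1.2.1, c1.2.2, c2, c3.1, c3.2, e4]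
            rfl
          · have c4 := Bool.eq_false_iff.mpr (fun h => h4 ((pvMem4 dl).mpr h))
            by_cases h5 : (5 : Nat) ∈ pvP dl
            · rw [pvMin?_eq dl 5 h5 (fun k hk => by
                interval_cases k
                · exact h0
                · exact h1
                · exact h2
                · exact h3
                · exact h4)]
              have e5 := (pvMem5 dl).mp h5
              simp only [Bool.or_eq_false_iff] at c0 c1 c3 c4
              rw [c0.1, c0.2.1, c0.2.2.1, c0.2.2.2, c1.1, c1.2.1, c1.2.2, c2, c3.1, c3.2,
                c4.1, c4.2.1, c4.2.2, e5]
              rfl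
            · have c5 := Bool.eq_false_iff.mpr (fun h => h5 ((pvMem5 dl).mpr h))
              have hnil : pvP dl = [] := by
                rw [List.eq_nil_iff_forall_not_mem]
                intro g hg
                have h6 := pvMem_P_lt dl g hg
                interval_cases g
                · exact h0 hg
                · exact h1 hg
                · exact h2 hg
                · exact h3 hg
                · exact h4 hg
                · exact h5 hg
              rw [hnil]
              simp only [Bool.or_eq_false_iff] at c0 c1 c3 c4 c5
              rw [c0.1, c0.2.1, c0.2.2.1, c0.2.2.2, c1.1, c1.2.1, c1.2.2, c2, c3.1, c3.2,
                c4.1, c4.2.1, c4.2.2, c5.1, c5.2]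
              rfl
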